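-- pv_equiv track=rewrite | github.com/CirclesUBI/path-visualizer | src/pathfinder-old.py | sort_args
-- ===== SOURCE A (Python) =====
-- def sort_args(token_owner, srcs, dests, wads):
--     tokenOwner_ = []
--     srcs_ = []
--     dests_ = []
--     wads_ = []
--
--     for i in range(len(token_owner)):
--         if token_owner[i] != dests[i] and token_owner[i] != srcs[i]:
--             tokenOwner_.append(token_owner[i])
--             srcs_.append(srcs[i])
--             dests_.append(dests[i])
--             wads_.append(wads[i])
--
--     for i in range(len(token_owner)):
--         if token_owner[i] == srcs[i]:
--             tokenOwner_.append(token_owner[i])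
--             srcs_.append(srcs[i])
--             dests_.append(dests[i])
--             wads_.append(wads[i])
--         elif token_owner[i] == dests[i]:
--             tokenOwner_.insert(0, token_owner[i])
--             srcs_.insert(0, srcs[i])
--             dests_.insert(0, dests[i])
--             wads_.insert(0, wads[i])
--     return tokenOwner_, srcs_, dests_, wads_
-- ===== SOURCE B (Python) =====
-- def sort_args(token_owner, srcs, dests, wads):
--     rows = list(zip(token_owner, srcs, dests, wads))
--     front = [r for r in rows if r[0] != r[1] and r[0] == r[2]]
--     mid = [r for r in rows if r[0] != r[1] and r[0] != r[2]]
--     back = [r for r in rows if r[0] == r[1]]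
--     ordered = list(reversed(front)) + mid + back
--     return ([r[0] for r in ordered], [r[1] for r in ordered],
--             [r[2] for r in ordered], [r[3] for r in ordered])
-- ===== Notes on version B (the rewrite author's own statement) =====
-- stated objective: faster
-- what changed: B zips the four parallel lists into rows once and partitions them with three linear filters, concatenating reversed-front/middle/back, instead of A's two index loops whose insert(0, ...) calls shift all four output lists each time.
-- outside the precondition, e.g. on sort_args(['a'], [], [], []): A raises IndexError, B returns ([], [], [], [])
import Mathlib
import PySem

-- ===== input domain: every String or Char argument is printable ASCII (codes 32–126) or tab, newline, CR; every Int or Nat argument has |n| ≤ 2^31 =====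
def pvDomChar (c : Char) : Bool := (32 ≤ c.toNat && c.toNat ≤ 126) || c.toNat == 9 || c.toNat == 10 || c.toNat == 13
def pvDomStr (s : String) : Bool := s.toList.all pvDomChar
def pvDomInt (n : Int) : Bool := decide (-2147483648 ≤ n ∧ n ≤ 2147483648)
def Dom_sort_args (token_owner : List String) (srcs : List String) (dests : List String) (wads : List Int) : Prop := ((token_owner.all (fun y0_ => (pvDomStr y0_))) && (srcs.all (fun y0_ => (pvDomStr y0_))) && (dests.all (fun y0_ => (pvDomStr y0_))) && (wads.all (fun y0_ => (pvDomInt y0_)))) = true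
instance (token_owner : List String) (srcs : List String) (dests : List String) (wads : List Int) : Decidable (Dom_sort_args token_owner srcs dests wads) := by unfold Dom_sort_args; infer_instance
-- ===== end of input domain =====

-- B replaces A's two index loops with quadratic-cost insert(0, ·) by a single zip into rows,
-- three linear filters and one reversal/concatenation (objective: faster, asymptotic O(n) vs O(n^2)).

-- ===== PORT A =====
def sort_args (token_owner : List String) (srcs : List String) (dests : List String) (wads : List Int) : List String × List String × List String × List Int :=
  let n : Int := (token_owner.length : Int)
  -- first loop: keep the rows where token_owner differs from both dests and srcs (appended)
  let acc1 := (PySem.List.pyRange 0 n 1).foldl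
    (fun (acc : List String × List String × List String × List Int) i =>
      let t := PySem.List.pyGetD token_owner i ""
      let s := PySem.List.pyGetD srcs i ""
      let d := PySem.List.pyGetD dests i ""
      let w := PySem.List.pyGetD wads i 0
      if (t != d) && (t != s) then
        (acc.1 ++ [t], acc.2.1 ++ [s], acc.2.2.1 ++ [d], acc.2.2.2 ++ [w])
      else acc)
    ([], [], [], [])
  -- second loop: owner==srcs rows appended at the end, owner==dests rows inserted at position 0
  (PySem.List.pyRange 0 n 1).foldl
    (fun (acc : List String × List String × List String × List Int) i =>
      let t := PySem.List.pyGetD token_owner i ""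
      let s := PySem.List.pyGetD srcs i ""
      let d := PySem.List.pyGetD dests i ""
      let w := PySem.List.pyGetD wads i 0
      if t == s then
        (acc.1 ++ [t], acc.2.1 ++ [s], acc.2.2.1 ++ [d], acc.2.2.2 ++ [w])
      else if t == d then
        (t :: acc.1, s :: acc.2.1, d :: acc.2.2.1, w :: acc.2.2.2)
      else acc)
    acc1

-- ===== PORT B =====
-- Python's zip over the four parallel lists (truncates at the shortest list)
def pvZip4 : List String → List String → List String → List Int → List (String × String × String × Int)
  | t :: ts, s :: ss, d :: ds, w :: ws => (t, s, d, w) :: pvZip4 ts ss ds ws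
  | _, _, _, _ => []

def sort_args_alt (token_owner : List String) (srcs : List String) (dests : List String) (wads : List Int) : List String × List String × List String × List Int :=
  let rows := pvZip4 token_owner srcs dests wads
  let front := rows.filter (fun r => (r.1 != r.2.1) && (r.1 == r.2.2.1))
  let mid := rows.filter (fun r => (r.1 != r.2.1) && (r.1 != r.2.2.1))
  let back := rows.filter (fun r => r.1 == r.2.1)
  let ordered := front.reverse ++ mid ++ back
  (ordered.map (·.1), ordered.map (·.2.1), ordered.map (·.2.2.1), ordered.map (·.2.2.2))

-- ===== PRECONDITION & SPEC =====
-- A indexes srcs, dests and wads at every position of token_owner, so it raises IndexError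
-- when any of them is shorter than token_owner; exactly those inputs are excluded.
def Pre_sort_args (token_owner : List String) (srcs : List String) (dests : List String) (wads : List Int) : Prop :=
  token_owner.length ≤ srcs.length ∧ token_owner.length ≤ dests.length ∧ token_owner.length ≤ wads.length
instance (token_owner : List String) (srcs : List String) (dests : List String) (wads : List Int) : Decidable (Pre_sort_args token_owner srcs dests wads) := by unfold Pre_sort_args; infer_instance

def pvWitness_sort_args : List String × List String × List String × List Int :=
  (["a", "b", "c"], ["a", "x", "y"], ["z", "b", "q"], [1, 2, 3])

def Spec_sort_args (token_owner : List String) (srcs : List String) (dests : List String) (wads : List Int) (out : List String × List String × List String × List Int) : Prop := out = sort_args_alt token_owner srcs dests wads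
instance (token_owner : List String) (srcs : List String) (dests : List String) (wads : List Int) (out : List String × List String × List String × List Int) : Decidable (Spec_sort_args token_owner srcs dests wads out) := by unfold Spec_sort_args; infer_instance

-- ===== CLAIM (what is proved, stated in full; the proofs are below) =====
def Claim_equal_sort_args : Prop := ∀ (token_owner : List String) (srcs : List String) (dests : List String) (wads : List Int), Dom_sort_args token_owner srcs dests wads → Pre_sort_args token_owner srcs dests wads → Spec_sort_args token_owner srcs dests wads (sort_args token_owner srcs dests wads)

-- ===== LEMMAS AND PROOFS =====

-- abbreviated row type and the "unzip into four parallel lists" view of a row list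
def pvUnz (L : List (String × String × String × Int)) : List String × List String × List String × List Int :=
  (L.map (·.1), L.map (·.2.1), L.map (·.2.2.1), L.map (·.2.2.2))

theorem pvZip4_length (ts ss ds : List String) (ws : List Int)
    (h1 : ts.length ≤ ss.length) (h2 : ts.length ≤ ds.length) (h3 : ts.length ≤ ws.length) :
    (pvZip4 ts ss ds ws).length = ts.length := by
  induction ts generalizing ss ds ws with
  | nil => cases ss <;> cases ds <;> cases ws <;> simp [pvZip4]
  | cons t ts ih =>
    cases ss with
    | nil => simp at h1
    | cons s ss =>
      cases ds with
      | nil => simp at h2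
      | cons d ds =>
        cases ws with
        | nil => simp at h3
        | cons w ws =>
          simp only [pvZip4, List.length_cons]
          rw [ih ss ds ws (by simpa using h1) (by simpa using h2) (by simpa using h3)]

theorem pvZip4_getD (ts ss ds : List String) (ws : List Int) (k : Nat)
    (h1 : ts.length ≤ ss.length) (h2 : ts.length ≤ ds.length) (h3 : ts.length ≤ ws.length)
    (hk : k < ts.length) :
    (pvZip4 ts ss ds ws).getD k ("", "", "", 0) =
      (ts.getD k "", ss.getD k "", ds.getD k "", ws.getD k 0) := by
  induction ts generalizing ss ds ws k with
  | nil => simp at hk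
  | cons t ts ih =>
    cases ss with
    | nil => simp at h1
    | cons s ss =>
      cases ds with
      | nil => simp at h2
      | cons d ds =>
        cases ws with
        | nil => simp at h3
        | cons w ws =>
          cases k with
          | zero => simp [pvZip4]
          | succ k =>
            simp only [pvZip4, List.getD_cons_succ]
            exact ih ss ds ws k (by simpa using h1) (by simpa using h2) (by simpa using h3)
              (by simpa using hk)

-- bridge: an index loop over the four parallel lists is a fold over the zipped rows
theorem pv_fold_idx {σ : Type} (g : σ → String → String → String → Int → σ)
    (ts ss ds : List String) (ws : List Int) (init : σ)
    (h1 : ts.length ≤ ss.length) (h2 : ts.length ≤ ds.length) (h3 : ts.length ≤ ws.length) :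
    (PySem.List.pyRange 0 (ts.length : Int) 1).foldl
      (fun acc i => g acc (PySem.List.pyGetD ts i "") (PySem.List.pyGetD ss i "")
        (PySem.List.pyGetD ds i "") (PySem.List.pyGetD ws i 0)) init
    = (pvZip4 ts ss ds ws).foldl (fun acc r => g acc r.1 r.2.1 r.2.2.1 r.2.2.2) init := by
  have hl := pvZip4_length ts ss ds ws h1 h2 h3
  rw [PySem.List.foldl_congr_mem _ _
      (fun acc i => g acc (PySem.List.pyGetD (pvZip4 ts ss ds ws) i ("", "", "", 0)).1
        (PySem.List.pyGetD (pvZip4 ts ss ds ws) i ("", "", "", 0)).2.1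
        (PySem.List.pyGetD (pvZip4 ts ss ds ws) i ("", "", "", 0)).2.2.1
        (PySem.List.pyGetD (pvZip4 ts ss ds ws) i ("", "", "", 0)).2.2.2) init ?_]
  · have : (ts.length : Int) = ((pvZip4 ts ss ds ws).length : Int) := by rw [hl]
    rw [this]
    exact PySem.List.foldl_pyRange_zero_pyGetD' (pvZip4 ts ss ds ws) ("", "", "", 0)
      (fun acc r => g acc r.1 r.2.1 r.2.2.1 r.2.2.2) init
  · intro acc i hi
    rw [PySem.List.mem_pyRange_one] at hi
    obtain ⟨k, rfl⟩ : ∃ k : Nat, i = (k : Int) := ⟨i.toNat, (Int.toNat_of_nonneg hi.1).symm⟩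
    have hk : k < ts.length := by exact_mod_cast hi.2
    simp only [PySem.List.pyGetD_natCast]
    rw [pvZip4_getD ts ss ds ws k h1 h2 h3 hk]

-- loop 1 invariant: appending the rows where owner differs from both dests and srcs
theorem pv_loop1 (rows L : List (String × String × String × Int)) :
    rows.foldl
      (fun (acc : List String × List String × List String × List Int) r =>
        if (r.1 != r.2.2.1) && (r.1 != r.2.1) then
          (acc.1 ++ [r.1], acc.2.1 ++ [r.2.1], acc.2.2.1 ++ [r.2.2.1], acc.2.2.2 ++ [r.2.2.2])
        else acc)
      (pvUnz L)
    = pvUnz (L ++ rows.filter (fun r => (r.1 != r.2.2.1) && (r.1 != r.2.1))) := by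
  induction rows generalizing L with
  | nil => simp
  | cons r rows ih =>
    by_cases h : ((r.1 != r.2.2.1) && (r.1 != r.2.1)) = true
    · rw [List.foldl_cons, if_pos h,
        show ((pvUnz L).1 ++ [r.1], (pvUnz L).2.1 ++ [r.2.1], (pvUnz L).2.2.1 ++ [r.2.2.1],
          (pvUnz L).2.2.2 ++ [r.2.2.2]) = pvUnz (L ++ [r]) from by simp [pvUnz],
        ih (L ++ [r])]
      congr 1
      simp [h, List.append_assoc]
    · rw [List.foldl_cons, if_neg h, ih L]
      congr 1
      simp [h]

-- loop 2 invariant: owner==srcs rows appended in order; owner==dests rows collect reversed in front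
theorem pv_loop2 (rows L : List (String × String × String × Int)) :
    rows.foldl
      (fun (acc : List String × List String × List String × List Int) r =>
        if r.1 == r.2.1 then
          (acc.1 ++ [r.1], acc.2.1 ++ [r.2.1], acc.2.2.1 ++ [r.2.2.1], acc.2.2.2 ++ [r.2.2.2])
        else if r.1 == r.2.2.1 then
          (r.1 :: acc.1, r.2.1 :: acc.2.1, r.2.2.1 :: acc.2.2.1, r.2.2.2 :: acc.2.2.2)
        else acc)
      (pvUnz L)
    = pvUnz ((rows.filter (fun r => (r.1 != r.2.1) && (r.1 == r.2.2.1))).reverse ++ L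
        ++ rows.filter (fun r => r.1 == r.2.1)) := by
  induction rows generalizing L with
  | nil => simp
  | cons r rows ih =>
    by_cases hB : (r.1 == r.2.1) = true
    · rw [List.foldl_cons, if_pos hB,
        show ((pvUnz L).1 ++ [r.1], (pvUnz L).2.1 ++ [r.2.1], (pvUnz L).2.2.1 ++ [r.2.2.1],
          (pvUnz L).2.2.2 ++ [r.2.2.2]) = pvUnz (L ++ [r]) from by simp [pvUnz],
        ih (L ++ [r])]
      congr 1
      have hB' : r.1 = r.2.1 := by simpa using hB
      simp [hB', List.append_assoc]
    · by_cases hF : (r.1 == r.2.2.1) = true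
      · rw [List.foldl_cons, if_neg hB, if_pos hF,
          show (r.1 :: (pvUnz L).1, r.2.1 :: (pvUnz L).2.1, r.2.2.1 :: (pvUnz L).2.2.1,
            r.2.2.2 :: (pvUnz L).2.2.2) = pvUnz (r :: L) from by simp [pvUnz],
          ih (r :: L)]
        congr 1
        have hB' : ¬ r.1 = r.2.1 := by simpa using hB
        have hF' : r.1 = r.2.2.1 := by simpa using hF
        simp only [List.filter_cons]
        rw [if_pos (by rw [Bool.and_eq_true, bne_iff_ne, beq_iff_eq]; exact ⟨hB', hF'⟩), if_neg (by simpa using hB')]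
        simp [List.append_assoc]
      · rw [List.foldl_cons, if_neg hB, if_neg hF, ih L]
        congr 1
        have hB' : ¬ r.1 = r.2.1 := by simpa using hB
        have hF' : ¬ r.1 = r.2.2.1 := by simpa using hF
        simp [hB', hF']

-- ===== VERDICT (by name: the statement is the Claim_ definition above) =====
theorem sort_args_spec : Claim_equal_sort_args := by
  intro token_owner srcs dests wads _ hPre
  obtain ⟨h1, h2, h3⟩ := hPre
  show sort_args token_owner srcs dests wads = sort_args_alt token_owner srcs dests wads
  unfold sort_args sort_args_alt
  simp only []
  rw [pv_fold_idx (fun acc t s d w =>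
        if (t != d) && (t != s) then
          (acc.1 ++ [t], acc.2.1 ++ [s], acc.2.2.1 ++ [d], acc.2.2.2 ++ [w])
        else acc) token_owner srcs dests wads ([], [], [], []) h1 h2 h3,
      pv_fold_idx (fun acc t s d w =>
        if t == s then
          (acc.1 ++ [t], acc.2.1 ++ [s], acc.2.2.1 ++ [d], acc.2.2.2 ++ [w])
        else if t == d then (t :: acc.1, s :: acc.2.1, d :: acc.2.2.1, w :: acc.2.2.2)
        else acc) token_owner srcs dests wads _ h1 h2 h3]
  have hnil : (([], [], [], []) : List String × List String × List String × List Int)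
      = pvUnz [] := by simp [pvUnz]
  rw [hnil, pv_loop1, List.nil_append, pv_loop2]
  have hM : (pvZip4 token_owner srcs dests wads).filter
        (fun r => (r.1 != r.2.2.1) && (r.1 != r.2.1))
      = (pvZip4 token_owner srcs dests wads).filter
        (fun r => (r.1 != r.2.1) && (r.1 != r.2.2.1)) := by
    apply List.filter_congr
    intro r _
    exact Bool.and_comm _ _
  rw [hM]
  simp [pvUnz]
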